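-- pv_equiv track=rewrite | github.com/kuc161123/bybit-telegram-bot | checkpoints/CHECKPOINT_16_MIRROR_PHASE_FIX_20250731_032116/main.py | detect_approach_from_orders
-- ===== SOURCE A (Python) =====
-- from typing import List, Dict, Optional, Tuple
--
-- def detect_approach_from_orders(orders: List[Dict]) -> Optional[str]:
--     """
--     Detect trading approach from order patterns
--     Conservative: TP1_, TP2_, TP3_, TP4_, SL_, _LIMIT
--     Fast: _FAST_TP, _FAST_SL, TP_, SL_
--     GGShot: Similar to conservative but may have specific patterns
--     """
--     if not orders:
--         return None
--
--     # Updated patterns to include BOT_ prefix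
--     conservative_patterns = ['CONS_', 'TP1_', 'TP2_', 'TP3_', 'TP4_', '_LIMIT']
--     fast_patterns = ['FAST_', '_FAST_TP', '_FAST_SL', '_FAST_MARKET']
--     ggshot_patterns = ['GGSHOT_', '_GGSHOT_', 'GGShot']
--
--     conservative_count = 0
--     fast_count = 0
--     ggshot_count = 0
--     tp_count = 0
--
--     for order in orders:
--         order_link_id = order.get('orderLinkId', '')
--
--         # Check for GGShot patterns first
--         if any(pattern in order_link_id for pattern in ggshot_patterns):
--             ggshot_count += 1
--
--         # Check for conservative patterns
--         elif any(pattern in order_link_id for pattern in conservative_patterns):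
--             conservative_count += 1
--
--         # Check for fast patterns
--         elif any(pattern in order_link_id for pattern in fast_patterns):
--             fast_count += 1
--
--         # Count TPs for conservative detection
--         if order_link_id.startswith('TP') and '_' in order_link_id:
--             tp_count += 1
--
--     # Determine approach based on counts
--     if ggshot_count > 0:
--         return "ggshot"
--     elif conservative_count > 0 or tp_count >= 2:  # Multiple TPs indicate conservative
--         return "conservative"
--     elif fast_count > 0:
--         return "fast"
--
--     # Default based on order count (single TP/SL = fast, multiple = conservative)
--     tp_orders = [o for o in orders if o.get('stopOrderType') == 'TakeProfit']
--     if len(tp_orders) > 1: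
--         return "conservative"
--
--     return None
-- ===== SOURCE B (Python) =====
-- from typing import List, Dict, Optional
--
-- def detect_approach_from_orders(orders: List[Dict]) -> Optional[str]:
--     if not orders:
--         return None
--     ids = [o.get('orderLinkId', '') for o in orders]
--     if any(p in i for i in ids for p in ('GGSHOT_', '_GGSHOT_', 'GGShot')):
--         return "ggshot"
--     tp_count = sum(1 for i in ids if i.startswith('TP') and '_' in i)
--     if any(p in i for i in ids for p in ('CONS_', 'TP1_', 'TP2_', 'TP3_', 'TP4_', '_LIMIT')) or tp_count >= 2:
--         return "conservative"
--     if any(p in i for i in ids for p in ('FAST_', '_FAST_TP', '_FAST_SL', '_FAST_MARKET')):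
--         return "fast"
--     if sum(1 for o in orders if o.get('stopOrderType') == 'TakeProfit') > 1:
--         return "conservative"
--     return None
-- ===== Notes on version B (the rewrite author's own statement) =====
-- stated objective: idiomatic
-- what changed: Replaces the single loop maintaining four mutually-exclusive counters with independent short-circuiting any()/sum() passes over the extracted orderLinkIds, applying the same decision order (ggshot, then conservative/tp_count>=2, then fast, then TakeProfit count).
import Mathlib
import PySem

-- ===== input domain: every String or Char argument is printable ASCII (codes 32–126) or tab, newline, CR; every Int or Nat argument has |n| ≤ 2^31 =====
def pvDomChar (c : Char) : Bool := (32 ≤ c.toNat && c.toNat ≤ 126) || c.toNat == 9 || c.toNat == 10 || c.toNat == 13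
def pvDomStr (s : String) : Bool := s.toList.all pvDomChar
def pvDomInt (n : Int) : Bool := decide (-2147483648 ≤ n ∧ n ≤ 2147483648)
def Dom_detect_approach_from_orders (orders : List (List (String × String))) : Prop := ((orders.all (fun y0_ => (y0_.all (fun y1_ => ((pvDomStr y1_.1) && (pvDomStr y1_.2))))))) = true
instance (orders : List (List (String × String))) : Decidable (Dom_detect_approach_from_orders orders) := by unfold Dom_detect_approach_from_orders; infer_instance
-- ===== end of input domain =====

-- B replaces A's single four-counter loop with independent any/count passes over the extracted ids; objective: idiomatic, same cost.

-- shared helpers: order.get(key, dflt) on the association-list dict, and the pattern tests both Pythons perform on an id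
def pvGetOrd (order : List (String × String)) (k dflt : String) : String :=
  (PySem.Dict.mk order).getD k dflt

def consPatterns : List String := ["CONS_", "TP1_", "TP2_", "TP3_", "TP4_", "_LIMIT"]
def fastPatterns : List String := ["FAST_", "_FAST_TP", "_FAST_SL", "_FAST_MARKET"]
def ggPatterns : List String := ["GGSHOT_", "_GGSHOT_", "GGShot"]

def isGGid (i : String) : Bool := ggPatterns.any (fun p => PySem.Str.isIn p i)
def isConsId (i : String) : Bool := consPatterns.any (fun p => PySem.Str.isIn p i)
def isFastId (i : String) : Bool := fastPatterns.any (fun p => PySem.Str.isIn p i)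
def isTPid (i : String) : Bool := PySem.Str.startswith i "TP" && PySem.Str.isIn "_" i
def isTakeProfit (o : List (String × String)) : Bool :=
  (PySem.Dict.mk o).get? "stopOrderType" == some "TakeProfit"

-- ===== PORT A =====
-- one iteration of A's loop over the counter state (cc, fc, gc, tc)
def stepA (st : Int × Int × Int × Int) (order : List (String × String)) : Int × Int × Int × Int :=
  let id := pvGetOrd order "orderLinkId" ""
  let cc := st.1; let fc := st.2.1; let gc := st.2.2.1; let tc := st.2.2.2
  let st' :=
    if isGGid id then (cc, fc, gc + 1)
    else if isConsId id then (cc + 1, fc, gc)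
    else if isFastId id then (cc, fc + 1, gc)
    else (cc, fc, gc)
  let tc' := if isTPid id then tc + 1 else tc
  (st'.1, st'.2.1, st'.2.2, tc')

def detect_approach_from_orders (orders : List (List (String × String))) : Option String :=
  if orders = [] then none
  else
    let st := orders.foldl stepA (0, 0, 0, 0)
    if st.2.2.1 > 0 then some "ggshot"
    else if st.1 > 0 ∨ st.2.2.2 ≥ 2 then some "conservative"
    else if st.2.1 > 0 then some "fast"
    else
      let tp_orders := orders.filter isTakeProfit
      if tp_orders.length > 1 then some "conservative" else none

-- ===== PORT B =====
def detect_approach_from_orders_alt (orders : List (List (String × String))) : Option String :=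
  if orders = [] then none
  else
    let ids := orders.map (fun o => pvGetOrd o "orderLinkId" "")
    if ids.any isGGid then some "ggshot"
    else
      let tp_count := (ids.filter isTPid).length
      if ids.any isConsId ∨ tp_count ≥ 2 then some "conservative"
      else if ids.any isFastId then some "fast"
      else if orders.countP isTakeProfit > 1 then some "conservative"
      else none

-- ===== PRECONDITION & SPEC =====
def Spec_detect_approach_from_orders (orders : List (List (String × String))) (out : Option String) : Prop := out = detect_approach_from_orders_alt orders
instance (orders : List (List (String × String))) (out : Option String) : Decidable (Spec_detect_approach_from_orders orders out) := by unfold Spec_detect_approach_from_orders; infer_instance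

-- ===== CLAIM (what is proved, stated in full; the proofs are below) =====
def Claim_equal_detect_approach_from_orders : Prop := ∀ (orders : List (List (String × String))), Dom_detect_approach_from_orders orders → Spec_detect_approach_from_orders orders (detect_approach_from_orders orders)

-- ===== LEMMAS AND PROOFS =====

-- per-order versions of the id predicates
def pGG (o : List (String × String)) : Bool := isGGid (pvGetOrd o "orderLinkId" "")
def pCons (o : List (String × String)) : Bool := isConsId (pvGetOrd o "orderLinkId" "")
def pFast (o : List (String × String)) : Bool := isFastId (pvGetOrd o "orderLinkId" "")
def pTP (o : List (String × String)) : Bool := isTPid (pvGetOrd o "orderLinkId" "")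

-- A's fold computes the four counts in closed form
theorem foldA_eq (orders : List (List (String × String))) (cc fc gc tc : Int) :
    orders.foldl stepA (cc, fc, gc, tc) =
      (cc + (orders.countP (fun o => !pGG o && pCons o) : Int),
       fc + (orders.countP (fun o => !pGG o && !pCons o && pFast o) : Int),
       gc + (orders.countP pGG : Int),
       tc + (orders.countP pTP : Int)) := by
  induction orders generalizing cc fc gc tc with
  | nil => simp
  | cons o rest ih =>
    simp only [List.foldl_cons, List.countP_cons]
    cases hg : pGG o <;> cases hc : pCons o <;> cases hf : pFast o <;> cases ht : pTP o <;>
      simp only [pGG, pCons, pFast, pTP] at hg hc hf ht <;>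
      simp [stepA, hg, hc, hf, ht, ih, pGG, pCons, pFast] <;> omega

theorem countP_pos_iff_any {α : Type} (p : α → Bool) (l : List α) :
    (0 < (l.countP p : Int)) ↔ l.any p = true := by
  rw [Int.natCast_pos, List.countP_pos_iff, List.any_eq_true]

theorem countP_congr_of_no_gg (orders : List (List (String × String)))
    (hg : orders.any pGG = false) (q : List (String × String) → Bool) :
    orders.countP (fun o => !pGG o && q o) = orders.countP q := by
  apply List.countP_congr
  intro a ha
  have : pGG a = false := by
    cases h : pGG a
    · rfl
    · exact absurd (List.any_eq_true.2 ⟨a, ha, h⟩) (by simp [hg])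
  simp [this]

-- ===== VERDICT (by name: the statement is the Claim_ definition above) =====
theorem detect_approach_from_orders_spec : Claim_equal_detect_approach_from_orders := by
  unfold Claim_equal_detect_approach_from_orders
  intro orders _
  unfold Spec_detect_approach_from_orders detect_approach_from_orders detect_approach_from_orders_alt
  by_cases hnil : orders = []
  · simp [hnil]
  · simp only [hnil, if_false]
    rw [foldA_eq]
    simp only [List.any_map, List.filter_map, List.length_map, Function.comp_def,
      ← List.countP_eq_length_filter, zero_add]
    have hTmap : (orders.countP fun o => isTPid (pvGetOrd o "orderLinkId" "")) = orders.countP pTP := rfl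
    rw [hTmap]
    have eGG : (fun x => isGGid (pvGetOrd x "orderLinkId" "")) = pGG := rfl
    have eC : (fun x => isConsId (pvGetOrd x "orderLinkId" "")) = pCons := rfl
    have eF : (fun x => isFastId (pvGetOrd x "orderLinkId" "")) = pFast := rfl
    rw [eGG, eC, eF]
    have et : ((orders.countP pTP : Int) ≥ 2) ↔ 2 ≤ orders.countP pTP := by exact_mod_cast Iff.rfl
    by_cases hg : orders.any pGG = true
    · have hA : ((orders.countP pGG : Nat) : Int) > 0 := (countP_pos_iff_any pGG orders).2 hg
      rw [if_pos hA, if_pos hg]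
    · have hgf : orders.any pGG = false := by simpa using hg
      have hgA : ¬ ((orders.countP pGG : Nat) : Int) > 0 := by
        rw [gt_iff_lt, countP_pos_iff_any]; simp [hgf]
      have hf2 : orders.countP (fun o => !pGG o && !pCons o && pFast o) =
          orders.countP (fun o => !pCons o && pFast o) := by
        apply List.countP_congr
        intro a ha
        have hga : pGG a = false := by
          cases h : pGG a
          · rfl
          · exact absurd (List.any_eq_true.2 ⟨a, ha, h⟩) (by simp [hgf])
        simp [hga]
      rw [if_neg hgA, if_neg hg, countP_congr_of_no_gg orders hgf pCons, hf2]
    -- conservatives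
      by_cases hc : (orders.any pCons = true) ∨ 2 ≤ orders.countP pTP
      · have hA : ((orders.countP pCons : Nat) : Int) > 0 ∨ ((orders.countP pTP : Nat) : Int) ≥ 2 := by
          rcases hc with hc | hc
          · exact Or.inl ((countP_pos_iff_any pCons orders).2 hc)
          · exact Or.inr (et.2 hc)
        rw [if_pos hA, if_pos hc]
      · have hA : ¬ (((orders.countP pCons : Nat) : Int) > 0 ∨ ((orders.countP pTP : Nat) : Int) ≥ 2) := by
          rintro (h | h)
          · exact hc (Or.inl ((countP_pos_iff_any pCons orders).1 h))
          · exact hc (Or.inr (et.1 h))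
        rw [if_neg hA, if_neg hc]
        have hcf : orders.any pCons = false := by
          cases h : orders.any pCons
          · rfl
          · exact absurd (Or.inl h) hc
        have hfEq : orders.countP (fun o => !pCons o && pFast o) = orders.countP pFast := by
          apply List.countP_congr
          intro a ha
          have : pCons a = false := by
            cases h : pCons a
            · rfl
            · exact absurd (Or.inl (List.any_eq_true.2 ⟨a, ha, h⟩)) hc
          simp [this]
        rw [hfEq]
    -- fast
        by_cases hf : orders.any pFast = true
        · have hA : ((orders.countP pFast : Nat) : Int) > 0 := (countP_pos_iff_any pFast orders).2 hf
          rw [if_pos hA, if_pos hf]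
        · have hff : orders.any pFast = false := by simpa using hf
          have hA : ¬ ((orders.countP pFast : Nat) : Int) > 0 := by
            rw [gt_iff_lt, countP_pos_iff_any]; simp [hff]
          rw [if_neg hA, if_neg hf, List.countP_eq_length_filter]
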